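-- pv_equiv track=rewrite | github.com/Giftedx/bot | src/osrs/core/skills.py | calculate_runecraft_multiplier
-- ===== SOURCE A (Python) =====
-- def calculate_runecraft_multiplier(
--                                  level: int,
--                                  rune_level: int) -> int:
--     """Calculate runecraft multiple runes threshold.
--
--     Args:
--         level: Runecraft level
--         rune_level: Required level for rune
--
--     Returns:
--         Number of runes crafted per essence
--     """
--     if rune_level >= 50:  # Law runes and above never multiply
--         return 1
--
--     thresholds = {
--         1: 11,   # Air runes
--         2: 14,   # Mind runes
--         5: 19,   # Water runes
--         9: 26,   # Earth runes
--         14: 35,  # Fire runes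
--         20: 46,  # Body runes
--         27: 59,  # Cosmic runes
--         35: 74,  # Chaos runes
--         44: 91,  # Nature runes
--     }
--
--     multiplier = 1
--     threshold = thresholds.get(rune_level, 99)
--
--     while level >= threshold and threshold < 99:
--         multiplier += 1
--         threshold += threshold
--
--     return multiplier
-- ===== SOURCE B (Python) =====
-- def calculate_runecraft_multiplier(
--                                  level: int,
--                                  rune_level: int) -> int:
--     """Closed-form runes-per-essence multiplier (no loop)."""
--     if rune_level >= 50:  # Law runes and above never multiply
--         return 1
--
--     base = {
--         1: 11, 2: 14, 5: 19, 9: 26, 14: 35,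
--         20: 46, 27: 59, 35: 74, 44: 91,
--     }.get(rune_level, 99)
--
--     if level < base or base >= 99:
--         return 1
--     # doublings allowed by the level cap and by the hard 99 cap
--     return 1 + min((level // base).bit_length(), (98 // base).bit_length())
-- ===== Notes on version B (the rewrite author's own statement) =====
-- stated objective: simpler
-- what changed: Replaced the doubling while-loop by a closed-form count of doublings: 1 + min((level // base).bit_length(), (98 // base).bit_length()), guarded by level < base or base >= 99.
import Mathlib
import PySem

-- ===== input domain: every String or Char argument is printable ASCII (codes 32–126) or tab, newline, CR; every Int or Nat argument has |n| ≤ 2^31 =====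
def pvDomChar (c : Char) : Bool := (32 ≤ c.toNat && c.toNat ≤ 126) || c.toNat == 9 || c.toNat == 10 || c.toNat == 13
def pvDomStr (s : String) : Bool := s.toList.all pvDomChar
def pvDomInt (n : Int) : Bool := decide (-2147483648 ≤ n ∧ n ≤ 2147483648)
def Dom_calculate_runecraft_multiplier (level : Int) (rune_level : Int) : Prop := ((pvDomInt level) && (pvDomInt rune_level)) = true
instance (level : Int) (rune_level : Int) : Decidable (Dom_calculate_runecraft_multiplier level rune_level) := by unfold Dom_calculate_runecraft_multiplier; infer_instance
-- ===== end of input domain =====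

-- B replaces A's doubling while-loop by a closed-form bit_length count (objective: simpler).

-- ===== PORT A =====
-- A's while-loop; the fuel argument only makes the recursion total: every threshold this
-- file passes in is ≥ 11, so the loop body runs at most 4 times and fuel 8 is never exhausted.
def crmLoop : Nat → Int → Int → Int → Int
  | 0, multiplier, _, _ => multiplier
  | fuel+1, multiplier, threshold, level =>
    if level ≥ threshold ∧ threshold < 99 then
      crmLoop fuel (multiplier + 1) (threshold + threshold) level
    else multiplier

def calculate_runecraft_multiplier (level : Int) (rune_level : Int) : Int :=
  if rune_level ≥ 50 then 1
  else
    let thresholds : PySem.Dict Int Int :=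
      PySem.Dict.ofList [(1,11),(2,14),(5,19),(9,26),(14,35),(20,46),(27,59),(35,74),(44,91)]
    crmLoop 8 1 (thresholds.getD rune_level 99) level

-- ===== PORT B =====
def calculate_runecraft_multiplier_alt (level : Int) (rune_level : Int) : Int :=
  if rune_level ≥ 50 then 1
  else
    let base : Int :=
      PySem.Dict.getD
        (PySem.Dict.ofList [(1,11),(2,14),(5,19),(9,26),(14,35),(20,46),(27,59),(35,74),(44,91)])
        rune_level 99
    if level < base ∨ base ≥ 99 then 1
    else 1 + ((min (PySem.Int.bitLength (PySem.Int.floordiv level base))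
                   (PySem.Int.bitLength (PySem.Int.floordiv 98 base)) : Nat) : Int)

-- ===== PRECONDITION & SPEC =====
def Spec_calculate_runecraft_multiplier (level : Int) (rune_level : Int) (out : Int) : Prop := out = calculate_runecraft_multiplier_alt level rune_level
instance (level : Int) (rune_level : Int) (out : Int) : Decidable (Spec_calculate_runecraft_multiplier level rune_level out) := by unfold Spec_calculate_runecraft_multiplier; infer_instance

-- ===== CLAIM (what is proved, stated in full; the proofs are below) =====
def Claim_equal_calculate_runecraft_multiplier : Prop := ∀ (level : Int) (rune_level : Int), Dom_calculate_runecraft_multiplier level rune_level → Spec_calculate_runecraft_multiplier level rune_level (calculate_runecraft_multiplier level rune_level)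

-- ===== LEMMAS AND PROOFS =====

lemma bitLength_ge (q : Int) (k : Nat) (h : 2 ^ k ≤ q.natAbs) :
    k + 1 ≤ PySem.Int.bitLength q := by
  by_contra hc
  push Not at hc
  have a := PySem.Int.lt_two_pow_bitLength q
  have : (2:Nat) ^ PySem.Int.bitLength q ≤ 2 ^ k :=
    Nat.pow_le_pow_right (by norm_num) (by omega)
  omega

lemma bitLength_eq (q : Int) (k : Nat) (h1 : 2 ^ k ≤ q.natAbs) (h2 : q.natAbs < 2 ^ (k+1)) :
    PySem.Int.bitLength q = k + 1 := by
  have hne : q ≠ 0 := by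
    intro h; rw [h] at h1; simp at h1
  have hlo := bitLength_ge q k h1
  have b := PySem.Int.two_pow_bitLength_le q hne
  by_contra hc
  have : (2:Nat) ^ (k+1) ≤ 2 ^ (PySem.Int.bitLength q - 1) :=
    Nat.pow_le_pow_right (by norm_num) (by omega)
  omega

lemma crm_base_11 (level : Int) :
    crmLoop 8 1 11 level =
      if level < 11 ∨ (11:Int) ≥ 99 then 1
      else 1 + ((min (PySem.Int.bitLength (PySem.Int.floordiv level 11)) (PySem.Int.bitLength (PySem.Int.floordiv 98 11)) : Nat) : Int) := by
  have hq : PySem.Int.floordiv level 11 = level / 11 := PySem.Int.floordiv_eq_ediv_of_pos (by norm_num)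
  have h98 : PySem.Int.bitLength (PySem.Int.floordiv 98 11) = 4 := by decide
  rw [hq, h98]
  by_cases r0 : level < 11
  · rw [if_pos (Or.inl r0)]
    simp [crmLoop, show ¬ (11:Int) ≤ level from by omega]
  · rw [if_neg (by omega)]
    by_cases r1 : level < 22
    · have hb : PySem.Int.bitLength (level / 11) = 1 := by
        have h1 : level / 11 = 1 := by omega
        rw [h1]; decide
      rw [hb]
      simp [crmLoop, show (11:Int) ≤ level from by omega, show ¬ (22:Int) ≤ level from by omega]
    · by_cases r2 : level < 44
      · have hb : PySem.Int.bitLength (level / 11) = 2 :=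
          bitLength_eq _ 1 (by simp only [pow_succ, pow_zero, one_mul]; omega) (by simp only [pow_succ, pow_zero, one_mul]; omega)
        rw [hb]
        simp [crmLoop, show (11:Int) ≤ level from by omega, show (22:Int) ≤ level from by omega, show ¬ (44:Int) ≤ level from by omega]
      · by_cases r3 : level < 88
        · have hb : PySem.Int.bitLength (level / 11) = 3 :=
            bitLength_eq _ 2 (by simp only [pow_succ, pow_zero, one_mul]; omega) (by simp only [pow_succ, pow_zero, one_mul]; omega)
          rw [hb]
          simp [crmLoop, show (11:Int) ≤ level from by omega, show (22:Int) ≤ level from by omega, show (44:Int) ≤ level from by omega, show ¬ (88:Int) ≤ level from by omega]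
        · have hb : 4 ≤ PySem.Int.bitLength (level / 11) :=
            bitLength_ge _ 3 (by simp only [pow_succ, pow_zero, one_mul]; omega)
          have hm : min (PySem.Int.bitLength (level / 11)) 4 = 4 := by omega
          rw [hm]
          simp [crmLoop, show (11:Int) ≤ level from by omega, show (22:Int) ≤ level from by omega, show (44:Int) ≤ level from by omega, show (88:Int) ≤ level from by omega]

lemma crm_base_14 (level : Int) :
    crmLoop 8 1 14 level =
      if level < 14 ∨ (14:Int) ≥ 99 then 1
      else 1 + ((min (PySem.Int.bitLength (PySem.Int.floordiv level 14)) (PySem.Int.bitLength (PySem.Int.floordiv 98 14)) : Nat) : Int) := by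
  have hq : PySem.Int.floordiv level 14 = level / 14 := PySem.Int.floordiv_eq_ediv_of_pos (by norm_num)
  have h98 : PySem.Int.bitLength (PySem.Int.floordiv 98 14) = 3 := by decide
  rw [hq, h98]
  by_cases r0 : level < 14
  · rw [if_pos (Or.inl r0)]
    simp [crmLoop, show ¬ (14:Int) ≤ level from by omega]
  · rw [if_neg (by omega)]
    by_cases r1 : level < 28
    · have hb : PySem.Int.bitLength (level / 14) = 1 := by
        have h1 : level / 14 = 1 := by omega
        rw [h1]; decide
      rw [hb]
      simp [crmLoop, show (14:Int) ≤ level from by omega, show ¬ (28:Int) ≤ level from by omega]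
    · by_cases r2 : level < 56
      · have hb : PySem.Int.bitLength (level / 14) = 2 :=
          bitLength_eq _ 1 (by simp only [pow_succ, pow_zero, one_mul]; omega) (by simp only [pow_succ, pow_zero, one_mul]; omega)
        rw [hb]
        simp [crmLoop, show (14:Int) ≤ level from by omega, show (28:Int) ≤ level from by omega, show ¬ (56:Int) ≤ level from by omega]
      · have hb : 3 ≤ PySem.Int.bitLength (level / 14) :=
          bitLength_ge _ 2 (by simp only [pow_succ, pow_zero, one_mul]; omega)
        have hm : min (PySem.Int.bitLength (level / 14)) 3 = 3 := by omega
        rw [hm]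
        simp [crmLoop, show (14:Int) ≤ level from by omega, show (28:Int) ≤ level from by omega, show (56:Int) ≤ level from by omega]

lemma crm_base_19 (level : Int) :
    crmLoop 8 1 19 level =
      if level < 19 ∨ (19:Int) ≥ 99 then 1
      else 1 + ((min (PySem.Int.bitLength (PySem.Int.floordiv level 19)) (PySem.Int.bitLength (PySem.Int.floordiv 98 19)) : Nat) : Int) := by
  have hq : PySem.Int.floordiv level 19 = level / 19 := PySem.Int.floordiv_eq_ediv_of_pos (by norm_num)
  have h98 : PySem.Int.bitLength (PySem.Int.floordiv 98 19) = 3 := by decide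
  rw [hq, h98]
  by_cases r0 : level < 19
  · rw [if_pos (Or.inl r0)]
    simp [crmLoop, show ¬ (19:Int) ≤ level from by omega]
  · rw [if_neg (by omega)]
    by_cases r1 : level < 38
    · have hb : PySem.Int.bitLength (level / 19) = 1 := by
        have h1 : level / 19 = 1 := by omega
        rw [h1]; decide
      rw [hb]
      simp [crmLoop, show (19:Int) ≤ level from by omega, show ¬ (38:Int) ≤ level from by omega]
    · by_cases r2 : level < 76
      · have hb : PySem.Int.bitLength (level / 19) = 2 :=
          bitLength_eq _ 1 (by simp only [pow_succ, pow_zero, one_mul]; omega) (by simp only [pow_succ, pow_zero, one_mul]; omega)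
        rw [hb]
        simp [crmLoop, show (19:Int) ≤ level from by omega, show (38:Int) ≤ level from by omega, show ¬ (76:Int) ≤ level from by omega]
      · have hb : 3 ≤ PySem.Int.bitLength (level / 19) :=
          bitLength_ge _ 2 (by simp only [pow_succ, pow_zero, one_mul]; omega)
        have hm : min (PySem.Int.bitLength (level / 19)) 3 = 3 := by omega
        rw [hm]
        simp [crmLoop, show (19:Int) ≤ level from by omega, show (38:Int) ≤ level from by omega, show (76:Int) ≤ level from by omega]

lemma crm_base_26 (level : Int) :
    crmLoop 8 1 26 level =
      if level < 26 ∨ (26:Int) ≥ 99 then 1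
      else 1 + ((min (PySem.Int.bitLength (PySem.Int.floordiv level 26)) (PySem.Int.bitLength (PySem.Int.floordiv 98 26)) : Nat) : Int) := by
  have hq : PySem.Int.floordiv level 26 = level / 26 := PySem.Int.floordiv_eq_ediv_of_pos (by norm_num)
  have h98 : PySem.Int.bitLength (PySem.Int.floordiv 98 26) = 2 := by decide
  rw [hq, h98]
  by_cases r0 : level < 26
  · rw [if_pos (Or.inl r0)]
    simp [crmLoop, show ¬ (26:Int) ≤ level from by omega]
  · rw [if_neg (by omega)]
    by_cases r1 : level < 52
    · have hb : PySem.Int.bitLength (level / 26) = 1 := by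
        have h1 : level / 26 = 1 := by omega
        rw [h1]; decide
      rw [hb]
      simp [crmLoop, show (26:Int) ≤ level from by omega, show ¬ (52:Int) ≤ level from by omega]
    · have hb : 2 ≤ PySem.Int.bitLength (level / 26) :=
        bitLength_ge _ 1 (by simp only [pow_succ, pow_zero, one_mul]; omega)
      have hm : min (PySem.Int.bitLength (level / 26)) 2 = 2 := by omega
      rw [hm]
      simp [crmLoop, show (26:Int) ≤ level from by omega, show (52:Int) ≤ level from by omega]

lemma crm_base_35 (level : Int) :
    crmLoop 8 1 35 level =
      if level < 35 ∨ (35:Int) ≥ 99 then 1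
      else 1 + ((min (PySem.Int.bitLength (PySem.Int.floordiv level 35)) (PySem.Int.bitLength (PySem.Int.floordiv 98 35)) : Nat) : Int) := by
  have hq : PySem.Int.floordiv level 35 = level / 35 := PySem.Int.floordiv_eq_ediv_of_pos (by norm_num)
  have h98 : PySem.Int.bitLength (PySem.Int.floordiv 98 35) = 2 := by decide
  rw [hq, h98]
  by_cases r0 : level < 35
  · rw [if_pos (Or.inl r0)]
    simp [crmLoop, show ¬ (35:Int) ≤ level from by omega]
  · rw [if_neg (by omega)]
    by_cases r1 : level < 70
    · have hb : PySem.Int.bitLength (level / 35) = 1 := by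
        have h1 : level / 35 = 1 := by omega
        rw [h1]; decide
      rw [hb]
      simp [crmLoop, show (35:Int) ≤ level from by omega, show ¬ (70:Int) ≤ level from by omega]
    · have hb : 2 ≤ PySem.Int.bitLength (level / 35) :=
        bitLength_ge _ 1 (by simp only [pow_succ, pow_zero, one_mul]; omega)
      have hm : min (PySem.Int.bitLength (level / 35)) 2 = 2 := by omega
      rw [hm]
      simp [crmLoop, show (35:Int) ≤ level from by omega, show (70:Int) ≤ level from by omega]

lemma crm_base_46 (level : Int) :
    crmLoop 8 1 46 level =
      if level < 46 ∨ (46:Int) ≥ 99 then 1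
      else 1 + ((min (PySem.Int.bitLength (PySem.Int.floordiv level 46)) (PySem.Int.bitLength (PySem.Int.floordiv 98 46)) : Nat) : Int) := by
  have hq : PySem.Int.floordiv level 46 = level / 46 := PySem.Int.floordiv_eq_ediv_of_pos (by norm_num)
  have h98 : PySem.Int.bitLength (PySem.Int.floordiv 98 46) = 2 := by decide
  rw [hq, h98]
  by_cases r0 : level < 46
  · rw [if_pos (Or.inl r0)]
    simp [crmLoop, show ¬ (46:Int) ≤ level from by omega]
  · rw [if_neg (by omega)]
    by_cases r1 : level < 92
    · have hb : PySem.Int.bitLength (level / 46) = 1 := by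
        have h1 : level / 46 = 1 := by omega
        rw [h1]; decide
      rw [hb]
      simp [crmLoop, show (46:Int) ≤ level from by omega, show ¬ (92:Int) ≤ level from by omega]
    · have hb : 2 ≤ PySem.Int.bitLength (level / 46) :=
        bitLength_ge _ 1 (by simp only [pow_succ, pow_zero, one_mul]; omega)
      have hm : min (PySem.Int.bitLength (level / 46)) 2 = 2 := by omega
      rw [hm]
      simp [crmLoop, show (46:Int) ≤ level from by omega, show (92:Int) ≤ level from by omega]

lemma crm_base_59 (level : Int) :
    crmLoop 8 1 59 level =
      if level < 59 ∨ (59:Int) ≥ 99 then 1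
      else 1 + ((min (PySem.Int.bitLength (PySem.Int.floordiv level 59)) (PySem.Int.bitLength (PySem.Int.floordiv 98 59)) : Nat) : Int) := by
  have hq : PySem.Int.floordiv level 59 = level / 59 := PySem.Int.floordiv_eq_ediv_of_pos (by norm_num)
  have h98 : PySem.Int.bitLength (PySem.Int.floordiv 98 59) = 1 := by decide
  rw [hq, h98]
  by_cases r0 : level < 59
  · rw [if_pos (Or.inl r0)]
    simp [crmLoop, show ¬ (59:Int) ≤ level from by omega]
  · rw [if_neg (by omega)]
    have hb : 1 ≤ PySem.Int.bitLength (level / 59) :=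
      bitLength_ge _ 0 (by simp only [pow_succ, pow_zero, one_mul]; omega)
    have hm : min (PySem.Int.bitLength (level / 59)) 1 = 1 := by omega
    rw [hm]
    simp [crmLoop, show (59:Int) ≤ level from by omega]

lemma crm_base_74 (level : Int) :
    crmLoop 8 1 74 level =
      if level < 74 ∨ (74:Int) ≥ 99 then 1
      else 1 + ((min (PySem.Int.bitLength (PySem.Int.floordiv level 74)) (PySem.Int.bitLength (PySem.Int.floordiv 98 74)) : Nat) : Int) := by
  have hq : PySem.Int.floordiv level 74 = level / 74 := PySem.Int.floordiv_eq_ediv_of_pos (by norm_num)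
  have h98 : PySem.Int.bitLength (PySem.Int.floordiv 98 74) = 1 := by decide
  rw [hq, h98]
  by_cases r0 : level < 74
  · rw [if_pos (Or.inl r0)]
    simp [crmLoop, show ¬ (74:Int) ≤ level from by omega]
  · rw [if_neg (by omega)]
    have hb : 1 ≤ PySem.Int.bitLength (level / 74) :=
      bitLength_ge _ 0 (by simp only [pow_succ, pow_zero, one_mul]; omega)
    have hm : min (PySem.Int.bitLength (level / 74)) 1 = 1 := by omega
    rw [hm]
    simp [crmLoop, show (74:Int) ≤ level from by omega]

lemma crm_base_91 (level : Int) :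
    crmLoop 8 1 91 level =
      if level < 91 ∨ (91:Int) ≥ 99 then 1
      else 1 + ((min (PySem.Int.bitLength (PySem.Int.floordiv level 91)) (PySem.Int.bitLength (PySem.Int.floordiv 98 91)) : Nat) : Int) := by
  have hq : PySem.Int.floordiv level 91 = level / 91 := PySem.Int.floordiv_eq_ediv_of_pos (by norm_num)
  have h98 : PySem.Int.bitLength (PySem.Int.floordiv 98 91) = 1 := by decide
  rw [hq, h98]
  by_cases r0 : level < 91
  · rw [if_pos (Or.inl r0)]
    simp [crmLoop, show ¬ (91:Int) ≤ level from by omega]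
  · rw [if_neg (by omega)]
    have hb : 1 ≤ PySem.Int.bitLength (level / 91) :=
      bitLength_ge _ 0 (by simp only [pow_succ, pow_zero, one_mul]; omega)
    have hm : min (PySem.Int.bitLength (level / 91)) 1 = 1 := by omega
    rw [hm]
    simp [crmLoop, show (91:Int) ≤ level from by omega]

lemma crm_getD_default (rune_level : Int)
    (k1 : ¬ rune_level = 1) (k2 : ¬ rune_level = 2) (k3 : ¬ rune_level = 5)
    (k4 : ¬ rune_level = 9) (k5 : ¬ rune_level = 14) (k6 : ¬ rune_level = 20)
    (k7 : ¬ rune_level = 27) (k8 : ¬ rune_level = 35) (k9 : ¬ rune_level = 44) :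
    PySem.Dict.getD
      (PySem.Dict.ofList [((1:Int),(11:Int)),(2,14),(5,19),(9,26),(14,35),(20,46),(27,59),(35,74),(44,91)])
      rune_level 99 = 99 := by
  have h : (PySem.Dict.ofList [((1:Int),(11:Int)),(2,14),(5,19),(9,26),(14,35),(20,46),(27,59),(35,74),(44,91)])
      = ((((((((((PySem.Dict.empty : PySem.Dict Int Int).insert 1 11).insert 2 14).insert 5 19).insert 9 26).insert 14 35).insert 20 46).insert 27 59).insert 35 74).insert 44 91) := by
    rfl
  rw [h]
  simp only [PySem.Dict.getD_insert, PySem.Dict.getD_empty]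
  simp [k1, k2, k3, k4, k5, k6, k7, k8, k9]

-- ===== VERDICT (by name: the statement is the Claim_ definition above) =====
theorem calculate_runecraft_multiplier_spec : Claim_equal_calculate_runecraft_multiplier := by
  intro level rune_level _
  unfold Spec_calculate_runecraft_multiplier
  simp only [calculate_runecraft_multiplier, calculate_runecraft_multiplier_alt]
  by_cases h50 : rune_level ≥ 50
  · simp [h50]
  · simp only [h50, if_false]
    by_cases k1 : rune_level = 1
    · subst k1
      have hd : PySem.Dict.getD
          (PySem.Dict.ofList [((1:Int),(11:Int)),(2,14),(5,19),(9,26),(14,35),(20,46),(27,59),(35,74),(44,91)])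
          1 99 = 11 := by decide
      rw [hd]; exact crm_base_11 level
    by_cases k2 : rune_level = 2
    · subst k2
      have hd : PySem.Dict.getD
          (PySem.Dict.ofList [((1:Int),(11:Int)),(2,14),(5,19),(9,26),(14,35),(20,46),(27,59),(35,74),(44,91)])
          2 99 = 14 := by decide
      rw [hd]; exact crm_base_14 level
    by_cases k3 : rune_level = 5
    · subst k3
      have hd : PySem.Dict.getD
          (PySem.Dict.ofList [((1:Int),(11:Int)),(2,14),(5,19),(9,26),(14,35),(20,46),(27,59),(35,74),(44,91)])
          5 99 = 19 := by decide
      rw [hd]; exact crm_base_19 level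
    by_cases k4 : rune_level = 9
    · subst k4
      have hd : PySem.Dict.getD
          (PySem.Dict.ofList [((1:Int),(11:Int)),(2,14),(5,19),(9,26),(14,35),(20,46),(27,59),(35,74),(44,91)])
          9 99 = 26 := by decide
      rw [hd]; exact crm_base_26 level
    by_cases k5 : rune_level = 14
    · subst k5
      have hd : PySem.Dict.getD
          (PySem.Dict.ofList [((1:Int),(11:Int)),(2,14),(5,19),(9,26),(14,35),(20,46),(27,59),(35,74),(44,91)])
          14 99 = 35 := by decide
      rw [hd]; exact crm_base_35 level
    by_cases k6 : rune_level = 20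
    · subst k6
      have hd : PySem.Dict.getD
          (PySem.Dict.ofList [((1:Int),(11:Int)),(2,14),(5,19),(9,26),(14,35),(20,46),(27,59),(35,74),(44,91)])
          20 99 = 46 := by decide
      rw [hd]; exact crm_base_46 level
    by_cases k7 : rune_level = 27
    · subst k7
      have hd : PySem.Dict.getD
          (PySem.Dict.ofList [((1:Int),(11:Int)),(2,14),(5,19),(9,26),(14,35),(20,46),(27,59),(35,74),(44,91)])
          27 99 = 59 := by decide
      rw [hd]; exact crm_base_59 level
    by_cases k8 : rune_level = 35
    · subst k8
      have hd : PySem.Dict.getD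
          (PySem.Dict.ofList [((1:Int),(11:Int)),(2,14),(5,19),(9,26),(14,35),(20,46),(27,59),(35,74),(44,91)])
          35 99 = 74 := by decide
      rw [hd]; exact crm_base_74 level
    by_cases k9 : rune_level = 44
    · subst k9
      have hd : PySem.Dict.getD
          (PySem.Dict.ofList [((1:Int),(11:Int)),(2,14),(5,19),(9,26),(14,35),(20,46),(27,59),(35,74),(44,91)])
          44 99 = 91 := by decide
      rw [hd]; exact crm_base_91 level
    · rw [crm_getD_default rune_level k1 k2 k3 k4 k5 k6 k7 k8 k9]
      simp [crmLoop]
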